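-- pv_equiv track=rewrite | github.com/cognettings/vulscanner | integrates/back/src/custom_utils/validations.py | has_sequence
-- ===== SOURCE A (Python) =====
-- def sequence_increasing(
--     char: str, current_ord: int, sequence: list[int], is_increasing: bool
-- ) -> list[int]:
--     if is_increasing and str(chr(sequence[-1])).isalnum() and char.isalnum():
--         return [*sequence, current_ord]
--
--     return [current_ord]
--
-- def sequence_decreasing(
--     char: str, current_ord: int, sequence: list[int], is_increasing: bool
-- ) -> list[int]:
--     if (
--         not is_increasing
--         and str(chr(sequence[-1])).isalnum()
--         and char.isalnum()
--     ):
--         return [*sequence, current_ord]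
--
--     return [current_ord]
--
-- def has_sequence(value: str, sequence_size: int = 3) -> bool:
--     if len(value) < sequence_size or sequence_size <= 0:
--         return False
--
--     sequence: list[int] = [ord(value[0])]
--     is_increasing = False
--     for char in value[1:]:
--         current_ord: int = ord(char)
--
--         if sequence[-1] + 1 == current_ord:
--             if len(sequence) == 1:
--                 is_increasing = True
--             sequence = sequence_increasing(
--                 char, current_ord, sequence, is_increasing
--             )
--         elif sequence[-1] - 1 == current_ord:
--             if len(sequence) == 1:
--                 is_increasing = False
--             sequence = sequence_decreasing(
--                 char, current_ord, sequence, is_increasing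
--             )
--         else:
--             sequence = [current_ord]
--
--         if len(sequence) == sequence_size:
--             return True
--
--     return False
-- ===== SOURCE B (Python) =====
-- def has_sequence(value: str, sequence_size: int = 3) -> bool:
--     # Staged pipeline instead of a stateful list-rebuilding scan:
--     # (1) classify each adjacent pair as a signed ordinal step (0 unless a
--     #     consecutive alnum pair), (2) mark which steps extend the greedy run
--     #     (after a non-extending step any direction starts fresh), (3) scan the
--     #     flags for the streak length corresponding to sequence_size characters.
--     if len(value) < sequence_size or sequence_size <= 0:
--         return False
--     steps = []
--     for a, b in zip(value, value[1:]):
--         d = ord(b) - ord(a)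
--         steps.append(d if d in (1, -1) and a.isalnum() and b.isalnum() else 0)
--     ext = []
--     prev_ext, prev_d = False, 0
--     for d in steps:
--         e = d != 0 and (not prev_ext or d == prev_d)
--         ext.append(e)
--         prev_ext, prev_d = e, d
--     streak = 0
--     for e in ext:
--         streak = streak + 1 if e else 0
--         if streak == sequence_size - 1:
--             return True
--     return False
-- ===== Notes on version B (the rewrite author's own statement) =====
-- stated objective: alternative
-- what changed: Replaces A's stateful scan that rebuilds a list of ordinals (with a direction flag and two helper functions) by a staged pipeline: a zip pass classifying each adjacent pair as a signed step, a pass marking which steps extend the greedy run, and a streak scan over those flags.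
import Mathlib
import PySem

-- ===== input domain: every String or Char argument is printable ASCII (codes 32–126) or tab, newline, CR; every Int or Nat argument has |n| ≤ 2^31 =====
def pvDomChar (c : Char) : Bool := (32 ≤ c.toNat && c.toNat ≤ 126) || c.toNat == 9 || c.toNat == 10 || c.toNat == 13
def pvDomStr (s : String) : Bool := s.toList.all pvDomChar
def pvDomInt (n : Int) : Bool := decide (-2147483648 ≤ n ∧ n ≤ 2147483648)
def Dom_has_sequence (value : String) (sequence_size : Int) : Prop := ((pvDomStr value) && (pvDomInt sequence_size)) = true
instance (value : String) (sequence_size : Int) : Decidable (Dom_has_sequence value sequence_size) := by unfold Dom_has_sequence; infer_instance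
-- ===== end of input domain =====

-- B replaces A's stateful list-rebuilding scan by a staged pipeline (step classification, extend flags, streak scan).
-- ===== PORT A =====
-- str(chr(o)).isalnum() for an ordinal o (o is always a valid code point here)
def pvChrIsAlnum (o : Int) : Bool := PySem.Chars.isalnum (Char.ofNat o.toNat)

-- sequence[-1]; the sequence list is never empty, so the default is never used
def pvSeqLast (seq : List Int) : Int := (PySem.List.pyGet? seq (-1)).getD 0

def sequence_increasing (char : Char) (currentOrd : Int) (seq : List Int) (isInc : Bool) : List Int :=
  if isInc && pvChrIsAlnum (pvSeqLast seq) && PySem.Chars.isalnum char then seq ++ [currentOrd]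
  else [currentOrd]

def sequence_decreasing (char : Char) (currentOrd : Int) (seq : List Int) (isInc : Bool) : List Int :=
  if !isInc && pvChrIsAlnum (pvSeqLast seq) && PySem.Chars.isalnum char then seq ++ [currentOrd]
  else [currentOrd]

-- the for-loop of A, with the early `return True`
def pvLoopA (size : Int) : List Char → List Int → Bool → Bool
  | [], _, _ => false
  | c :: rest, seq, inc =>
    let currentOrd : Int := (c.toNat : Int)
    let st :=
      if pvSeqLast seq + 1 == currentOrd then
        let inc' := if seq.length == 1 then true else inc
        (sequence_increasing c currentOrd seq inc', inc')
      else if pvSeqLast seq - 1 == currentOrd then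
        let inc' := if seq.length == 1 then false else inc
        (sequence_decreasing c currentOrd seq inc', inc')
      else ([currentOrd], inc)
    if (st.1.length : Int) == size then true else pvLoopA size rest st.1 st.2

def has_sequence (value : String) (sequence_size : Int) : Bool :=
  if (PySem.Str.len value : Int) < sequence_size || sequence_size ≤ 0 then false
  else
    match value.toList with
    | [] => false  -- unreachable: len value ≥ sequence_size > 0
    | c :: rest => pvLoopA sequence_size rest [(c.toNat : Int)] false

-- ===== PORT B =====
-- stage 1: signed ordinal step of each adjacent pair, 0 unless a consecutive alnum pair
def pvStep (a b : Char) : Int :=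
  let d : Int := (b.toNat : Int) - (a.toNat : Int)
  if (d == 1 || d == -1) && PySem.Chars.isalnum a && PySem.Chars.isalnum b then d else 0

def pvSteps (l : List Char) : List Int := (l.zip l.tail).map (fun p => pvStep p.1 p.2)

-- stage 2: which steps extend the greedy run (after a non-extending step any direction starts fresh)
def pvExts : List Int → Bool → Int → List Bool
  | [], _, _ => []
  | d :: rest, prevExt, prevD =>
    let e := d != 0 && (!prevExt || d == prevD)
    e :: pvExts rest e d

-- stage 3: does some extend-streak reach exactly sequence_size - 1?
def pvStreak (k : Int) : List Bool → Int → Bool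
  | [], _ => false
  | e :: rest, streak =>
    let s' : Int := if e then streak + 1 else 0
    if s' == k - 1 then true else pvStreak k rest s'

def has_sequence_alt (value : String) (sequence_size : Int) : Bool :=
  if (PySem.Str.len value : Int) < sequence_size || sequence_size ≤ 0 then false
  else pvStreak sequence_size (pvExts (pvSteps value.toList) false 0) 0

-- ===== PRECONDITION & SPEC =====
def Spec_has_sequence (value : String) (sequence_size : Int) (out : Bool) : Prop := out = has_sequence_alt value sequence_size
instance (value : String) (sequence_size : Int) (out : Bool) : Decidable (Spec_has_sequence value sequence_size out) := by unfold Spec_has_sequence; infer_instance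

-- ===== CLAIM (what is proved, stated in full; the proofs are below) =====
def Claim_equal_has_sequence : Prop := ∀ (value : String) (sequence_size : Int), Dom_has_sequence value sequence_size → Spec_has_sequence value sequence_size (has_sequence value sequence_size)

-- ===== LEMMAS AND PROOFS =====
theorem pvSeqLast_append (s : List Int) (x : Int) : pvSeqLast (s ++ [x]) = x := by
  simp [pvSeqLast, PySem.List.pyGet?, PySem.List.pyIdx?]
theorem pvSeqLast_single (x : Int) : pvSeqLast [x] = x := pvSeqLast_append [] x
theorem pvChrIsAlnum_ord (p : Char) :
    pvChrIsAlnum ((p.toNat : Int)) = PySem.Chars.isalnum p := by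
  simp [pvChrIsAlnum]
theorem pvSteps_cons (p c : Char) (l : List Char) :
    pvSteps (p :: c :: l) = pvStep p c :: pvSteps (c :: l) := rfl

theorem pvLoopAB (size : Int) : ∀ (rest : List Char) (s : List Int) (p : Char) (inc : Bool) (prevD : Int),
    (s ≠ [] → prevD = (if inc then 1 else -1)) →
    pvLoopA size rest (s ++ [((p.toNat : Int))]) inc
      = pvStreak size (pvExts (pvSteps (p :: rest)) (!s.isEmpty) prevD) ((s.length : Int)) := by
  intro rest
  induction rest with
  | nil => intro s p inc prevD _; simp [pvLoopA, pvSteps, pvExts, pvStreak]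
  | cons c rest ih =>
    intro s p inc prevD hpd
    by_cases hp : ((c.toNat : Int)) = (p.toNat : Int) + 1
    · by_cases hal : (PySem.Chars.isalnum p && PySem.Chars.isalnum c) = true
      · obtain ⟨halp, halc⟩ := Bool.and_eq_true_iff.mp hal
        by_cases hs : s = []
        · subst hs
          have A1 := ih [(p.toNat : Int)] c true 1 (fun _ => rfl)
          simp only [hp, List.cons_append, List.nil_append] at A1
          simp [pvLoopA, pvSteps_cons, pvExts, pvStreak, pvStep, pvSeqLast_single,
            sequence_increasing, pvChrIsAlnum_ord, hp, halp, halc, A1]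
          congr 1
          simp only [decide_eq_decide]
          omega
        · -- run already in progress
          have hD := hpd hs
          have hse0 : s.isEmpty = false := by simp [hs]
          have hseA : (s ++ [((p.toNat : Int))]).isEmpty = false := by simp
          cases inc with
          | true =>
            have A1 := ih (s ++ [(p.toNat : Int)]) c true 1 (fun _ => rfl)
            simp only [hp, List.append_assoc, List.cons_append, List.nil_append,
              hseA, Bool.not_false,
              List.length_append, List.length_cons, List.length_nil] at A1
            simp [pvLoopA, pvSteps_cons, pvExts, pvStreak, pvStep, pvSeqLast_append,
              sequence_increasing, pvChrIsAlnum_ord, hp, halp, halc, hs, hD,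
              List.length_eq_zero_iff, hse0, A1]
            congr 1
            simp only [decide_eq_decide]
            omega
          | false =>
            have A0 := ih [] c false 1 (by simp)
            simp only [hp, List.nil_append, List.isEmpty_nil, Bool.not_true, List.length_nil,
              Nat.cast_zero] at A0
            simp [pvLoopA, pvSteps_cons, pvExts, pvStreak, pvStep, pvSeqLast_append,
              sequence_increasing, pvChrIsAlnum_ord, hp, halp, halc, hs, hD,
              List.length_eq_zero_iff, hse0, A0]
            congr 1
            simp only [decide_eq_decide]
            omega
      · -- an endpoint is not alnum: step classified 0, A resets
        have hal' : (PySem.Chars.isalnum p && PySem.Chars.isalnum c) = false := by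
          simpa using hal
        by_cases hs : s = []
        · subst hs
          have A0 := ih [] c true 0 (by simp)
          simp only [hp, List.nil_append, List.isEmpty_nil, List.length_nil, Nat.cast_zero] at A0
          rcases Bool.and_eq_false_iff.mp hal' with h | h <;>
            [skip; skip] <;>
            simp [pvLoopA, pvSteps_cons, pvExts, pvStreak, pvStep, pvSeqLast_single,
              sequence_increasing, pvChrIsAlnum_ord, hp, h, A0] <;>
            (congr 1; simp only [decide_eq_decide]; omega)
        · have hse0 : s.isEmpty = false := by simp [hs]
          have A0 := ih [] c inc 0 (by simp)
          simp only [hp, List.nil_append, List.isEmpty_nil, List.length_nil, Nat.cast_zero] at A0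
          rcases Bool.and_eq_false_iff.mp hal' with h | h <;>
            [skip; skip] <;>
            simp [pvLoopA, pvSteps_cons, pvExts, pvStreak, pvStep, pvSeqLast_append,
              sequence_increasing, pvChrIsAlnum_ord, hp, h, hs, hse0,
              List.length_eq_zero_iff, A0] <;>
            (congr 1; simp only [decide_eq_decide]; omega)
    · by_cases hm : ((c.toNat : Int)) = (p.toNat : Int) - 1
      · -- decreasing step
        have hne1 : ¬ ((p.toNat : Int)) + 1 = (p.toNat : Int) - 1 := by omega
        have hd : ((p.toNat : Int) - 1 - (p.toNat : Int)) = -1 := by ring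
        by_cases hal : (PySem.Chars.isalnum p && PySem.Chars.isalnum c) = true
        · obtain ⟨halp, halc⟩ := Bool.and_eq_true_iff.mp hal
          by_cases hs : s = []
          · subst hs
            have A1 := ih [(p.toNat : Int)] c false (-1) (fun _ => rfl)
            simp only [hm, List.cons_append, List.nil_append] at A1
            simp [pvLoopA, pvSteps_cons, pvExts, pvStreak, pvStep, pvSeqLast_single,
              sequence_decreasing, pvChrIsAlnum_ord, hm, hne1, hd, halp, halc, A1]
            congr 1
            simp only [decide_eq_decide]
            omega
          · have hD := hpd hs
            have hse0 : s.isEmpty = false := by simp [hs]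
            have hseA : (s ++ [((p.toNat : Int))]).isEmpty = false := by simp
            cases inc with
            | false =>
              have A1 := ih (s ++ [(p.toNat : Int)]) c false (-1) (fun _ => rfl)
              simp only [hm, List.append_assoc, List.cons_append, List.nil_append, hseA,
                Bool.not_false, List.length_append, List.length_cons, List.length_nil] at A1
              simp [pvLoopA, pvSteps_cons, pvExts, pvStreak, pvStep, pvSeqLast_append,
                sequence_decreasing, pvChrIsAlnum_ord, hm, hne1, hd, halp, halc, hs, hD,
                List.length_eq_zero_iff, hse0, A1]
              congr 1
              simp only [decide_eq_decide]
              omega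
            | true =>
              have A0 := ih [] c true (-1) (by simp)
              simp only [hm, List.nil_append, List.isEmpty_nil, Bool.not_true, List.length_nil,
                Nat.cast_zero] at A0
              simp [pvLoopA, pvSteps_cons, pvExts, pvStreak, pvStep, pvSeqLast_append,
                sequence_decreasing, pvChrIsAlnum_ord, hm, hne1, hd, halp, halc, hs, hD,
                List.length_eq_zero_iff, hse0, A0]
              congr 1
              simp only [decide_eq_decide]
              omega
        · have hal' : (PySem.Chars.isalnum p && PySem.Chars.isalnum c) = false := by
            simpa using hal
          by_cases hs : s = []
          · subst hs
            have A0 := ih [] c false 0 (by simp)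
            simp only [hm, List.nil_append, List.isEmpty_nil, List.length_nil, Nat.cast_zero] at A0
            rcases Bool.and_eq_false_iff.mp hal' with h | h <;>
              [skip; skip] <;>
              simp [pvLoopA, pvSteps_cons, pvExts, pvStreak, pvStep, pvSeqLast_single,
                sequence_decreasing, pvChrIsAlnum_ord, hm, hne1, hd, h, A0] <;>
              (congr 1; simp only [decide_eq_decide]; omega)
          · have hse0 : s.isEmpty = false := by simp [hs]
            have A0 := ih [] c inc 0 (by simp)
            simp only [hm, List.nil_append, List.isEmpty_nil, List.length_nil, Nat.cast_zero] at A0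
            rcases Bool.and_eq_false_iff.mp hal' with h | h <;>
              [skip; skip] <;>
              simp [pvLoopA, pvSteps_cons, pvExts, pvStreak, pvStep, pvSeqLast_append,
                sequence_decreasing, pvChrIsAlnum_ord, hm, hne1, hd, h, hs, hse0,
                List.length_eq_zero_iff, A0] <;>
              (congr 1; simp only [decide_eq_decide]; omega)
      · -- not an ordinal step at all: reset
        have h1 : ¬ (((p.toNat : Int)) + 1 = (c.toNat : Int)) := by omega
        have h2 : ¬ (((p.toNat : Int)) - 1 = (c.toNat : Int)) := by omega
        have h3 : ¬ (((c.toNat : Int)) - (p.toNat : Int) = 1) := by omega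
        have h4 : ¬ (((c.toNat : Int)) - (p.toNat : Int) = -1) := by omega
        have A0 := ih [] c inc 0 (by simp)
        simp only [List.nil_append, List.isEmpty_nil, List.length_nil, Nat.cast_zero] at A0
        by_cases hs : s = []
        · subst hs
          simp [pvLoopA, pvSteps_cons, pvExts, pvStreak, pvStep, pvSeqLast_single,
            h1, h2, h3, h4, A0]
          congr 1
          simp only [decide_eq_decide]
          omega
        · have hse0 : s.isEmpty = false := by simp [hs]
          simp [pvLoopA, pvSteps_cons, pvExts, pvStreak, pvStep, pvSeqLast_append,
            h1, h2, h3, h4, hse0, A0]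
          congr 1
          simp only [decide_eq_decide]
          omega

-- ===== VERDICT (by name: the statement is the Claim_ definition above) =====
theorem has_sequence_spec : Claim_equal_has_sequence := by
  intro value sequence_size _
  unfold Spec_has_sequence has_sequence has_sequence_alt
  split_ifs with h
  · rfl
  · cases hv : value.toList with
    | nil => simp [pvSteps, pvExts, pvStreak]
    | cons c rest =>
      have := pvLoopAB sequence_size rest [] c false 0 (by simp)
      simpa using this
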